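-- pv_equiv track=rewrite | github.com/mayflower/agentsh | src/agentsh/commands/stream.py | _split_awk_statements
-- ===== SOURCE A (Python) =====
-- def _split_awk_statements(action: str) -> list[str]:
--     """Split awk action into statements on ; and newlines."""
--     stmts: list[str] = []
--     current: list[str] = []
--     in_str = False
--     i = 0
--     while i < len(action):
--         ch = action[i]
--         if in_str:
--             current.append(ch)
--             if ch == "\\" and i + 1 < len(action):
--                 i += 1
--                 current.append(action[i])
--             elif ch == '"':
--                 in_str = False
--         elif ch == '"':
--             in_str = True
--             current.append(ch)
--         elif ch in (";", "\n"):
--             stmts.append("".join(current))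
--             current = []
--         else:
--             current.append(ch)
--         i += 1
--     if current:
--         stmts.append("".join(current))
--     return stmts
-- ===== SOURCE B (Python) =====
-- def _split_awk_statements(action: str) -> list[str]:
--     """Split awk action into statements on ; and newlines.
--
--     Different decomposition: a helper finds the index of the next top-level
--     separator in a suffix; the main loop repeatedly slices off the prefix,
--     instead of maintaining a per-statement character buffer.
--     """
--
--     def _find_cut(s: str) -> int:
--         in_str = False
--         i = 0
--         while i < len(s):
--             ch = s[i]
--             if in_str:
--                 if ch == "\\" and i + 1 < len(s):
--                     i += 1
--                 elif ch == '"':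
--                     in_str = False
--             elif ch == '"':
--                 in_str = True
--             elif ch in (";", "\n"):
--                 return i
--             i += 1
--         return -1
--
--     stmts: list[str] = []
--     rest = action
--     while True:
--         cut = _find_cut(rest)
--         if cut < 0:
--             break
--         stmts.append(rest[:cut])
--         rest = rest[cut + 1:]
--     if rest:
--         stmts.append(rest)
--     return stmts
-- ===== Notes on version B (the rewrite author's own statement) =====
-- stated objective: alternative
-- what changed: Replaces the single stateful scan with per-statement character buffers by a find-next-top-level-separator helper plus a loop that slices whole statement prefixes off the remaining string.
import Mathlib
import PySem

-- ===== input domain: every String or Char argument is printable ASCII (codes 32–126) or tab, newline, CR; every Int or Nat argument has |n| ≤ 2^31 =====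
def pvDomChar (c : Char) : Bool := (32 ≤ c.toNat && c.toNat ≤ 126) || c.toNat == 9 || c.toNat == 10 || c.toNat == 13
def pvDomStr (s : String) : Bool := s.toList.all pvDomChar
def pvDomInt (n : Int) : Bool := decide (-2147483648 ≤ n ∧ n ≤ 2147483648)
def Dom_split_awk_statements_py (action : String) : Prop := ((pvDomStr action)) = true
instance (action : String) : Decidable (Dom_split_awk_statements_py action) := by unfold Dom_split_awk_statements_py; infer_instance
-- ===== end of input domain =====

-- B replaces A's buffered scan by a find-next-separator helper plus prefix slicing; same cost, different decomposition.

-- ===== PORT A =====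
-- Literal port of A's while loop: state = (remaining chars, stmts, current buffer, in_str);
-- the escape branch ('\\' inside a string with a following char) consumes two characters.
def pvGoA : List Char → List String → List Char → Bool → List String
  | [], stmts, cur, _ => if cur.isEmpty then stmts else stmts ++ [String.mk cur]
  | ch :: rest, stmts, cur, inStr =>
    if inStr then
      if ch = '\\' then
        match rest with
        | d :: rest' => pvGoA rest' stmts (cur ++ [ch, d]) true
        | [] => pvGoA [] stmts (cur ++ [ch]) true
      else if ch = '"' then pvGoA rest stmts (cur ++ [ch]) false
      else pvGoA rest stmts (cur ++ [ch]) true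
    else if ch = '"' then pvGoA rest stmts (cur ++ [ch]) true
    else if ch = ';' ∨ ch = '\n' then pvGoA rest (stmts ++ [String.mk cur]) [] false
    else pvGoA rest stmts (cur ++ [ch]) false

def split_awk_statements_py (action : String) : List String :=
  pvGoA action.toList [] [] false

-- ===== PORT B =====
-- Port of B's _find_cut: index of the first top-level ';' or '\n', none if absent.
def pvFindCut : List Char → Bool → Option Nat
  | [], _ => none
  | ch :: rest, inStr =>
    if inStr then
      if ch = '\\' then
        match rest with
        | _ :: rest' => (pvFindCut rest' true).map (· + 2)
        | [] => none
      else if ch = '"' then (pvFindCut rest false).map (· + 1)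
      else (pvFindCut rest true).map (· + 1)
    else if ch = '"' then (pvFindCut rest true).map (· + 1)
    else if ch = ';' ∨ ch = '\n' then some 0
    else (pvFindCut rest false).map (· + 1)

theorem pvFindCut_lt : ∀ (s : List Char) (b : Bool) (i : Nat),
    pvFindCut s b = some i → i < s.length := by
  intro s b i h
  fun_induction pvFindCut s b generalizing i <;> simp_all [Option.map_eq_some_iff] <;>
    first
    | omega
    | (obtain ⟨j, hj, rfl⟩ := h
       rename_i ih _ _
       have := ih j hj
       omega)
    | (obtain ⟨j, hj, rfl⟩ := h
       rename_i ih
       have := ih j hj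
       omega)

-- B's main loop: slice the prefix up to each cut; slices rest[:cut] / rest[cut+1:] are
-- take/drop (the indices are in range by pvFindCut_lt, so this is exact).
def pvSplitB (s : List Char) : List String :=
  match h : pvFindCut s false with
  | some i => String.mk (s.take i) :: pvSplitB (s.drop (i + 1))
  | none => if s.isEmpty then [] else [String.mk s]
termination_by s.length
decreasing_by
  have := pvFindCut_lt s false i h
  simp_all [List.length_drop]
  omega

def split_awk_statements_py_alt (action : String) : List String :=
  pvSplitB action.toList

-- ===== PRECONDITION & SPEC =====
def Spec_split_awk_statements_py (action : String) (out : List String) : Prop := out = split_awk_statements_py_alt action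
instance (action : String) (out : List String) : Decidable (Spec_split_awk_statements_py action out) := by unfold Spec_split_awk_statements_py; infer_instance

-- ===== CLAIM (what is proved, stated in full; the proofs are below) =====
def Claim_equal_split_awk_statements_py : Prop := ∀ (action : String), Dom_split_awk_statements_py action → Spec_split_awk_statements_py action (split_awk_statements_py action)

-- ===== LEMMAS AND PROOFS =====

-- A's scan from any state, described by the next cut: up to the cut it appends every
-- character to the current buffer verbatim, then emits it and restarts; with no cut it
-- flushes the (buffer ++ rest) unless empty.
-- Continuation: what A's scan does given the position of the next top-level separator.
def pvCont (s : List Char) (stmts : List String) (cur : List Char) : Option Nat → List String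
  | some i => pvGoA (s.drop (i + 1)) (stmts ++ [String.mk (cur ++ s.take i)]) [] false
  | none => if (cur ++ s).isEmpty then stmts else stmts ++ [String.mk (cur ++ s)]

theorem pvCont_shift (ch : Char) (s : List Char) (stmts : List String) (cur : List Char)
    (o : Option Nat) :
    pvCont (ch :: s) stmts cur (o.map (· + 1)) = pvCont s stmts (cur ++ [ch]) o := by
  cases o <;> simp [pvCont]

theorem pvCont_shift2 (c d : Char) (s : List Char) (stmts : List String) (cur : List Char)
    (o : Option Nat) :
    pvCont (c :: d :: s) stmts cur (o.map (· + 2)) = pvCont s stmts (cur ++ [c, d]) o := by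
  cases o <;> simp [pvCont]

theorem pvGoA_findCut : ∀ (s : List Char) (stmts : List String) (cur : List Char) (b : Bool),
    pvGoA s stmts cur b = pvCont s stmts cur (pvFindCut s b) := by
  intro s stmts cur b
  fun_induction pvGoA s stmts cur b
  case case1 =>
    rename_i stmts cur b h
    simp [pvFindCut, pvCont, *]
  case case2 =>
    rename_i stmts cur b h
    simp_all [pvFindCut, pvCont, List.isEmpty_iff]
  case case3 =>
    rename_i stmts cur d rest' ih
    have h2 : pvFindCut ('\\' :: d :: rest') true = (pvFindCut rest' true).map (· + 2) := by
      rw [pvFindCut.eq_def]; simp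
    rw [ih, h2, pvCont_shift2]
  case case4 =>
    rename_i stmts cur ih
    simp [pvGoA, pvFindCut, pvCont, List.isEmpty_iff]
  case case5 =>
    rename_i rest stmts cur h ih
    have h2 : pvFindCut ('"' :: rest) true = (pvFindCut rest false).map (· + 1) := by
      rw [pvFindCut.eq_def]; simp
    rw [ih, h2, pvCont_shift]
  case case6 =>
    rename_i ch rest stmts cur h1 hq ih
    have h2 : pvFindCut (ch :: rest) true = (pvFindCut rest true).map (· + 1) := by
      rw [pvFindCut.eq_def]; simp [h1, hq]
    rw [ih, h2, pvCont_shift]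
  case case7 =>
    rename_i rest stmts cur inStr h ih
    have hb : inStr = false := by simpa using h
    subst hb
    have h2 : pvFindCut ('"' :: rest) false = (pvFindCut rest true).map (· + 1) := by
      rw [pvFindCut.eq_def]; simp
    rw [ih, h2, pvCont_shift]
  case case8 =>
    rename_i ch rest stmts cur inStr h1 hq hsep ih
    have hb : inStr = false := by simpa using h1
    subst hb
    have h2 : pvFindCut (ch :: rest) false = some 0 := by
      rcases hsep with h | h <;> subst h <;> rw [pvFindCut.eq_def] <;> simp
    rw [h2]
    simp [pvCont]
  case case9 =>
    rename_i ch rest stmts cur inStr h1 hq hsep ih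
    have hb : inStr = false := by simpa using h1
    subst hb
    have h2 : pvFindCut (ch :: rest) false = (pvFindCut rest false).map (· + 1) := by
      rw [pvFindCut.eq_def]; simp [hq, hsep]
    rw [ih, h2, pvCont_shift]

theorem pvGoA_eq_splitB : ∀ (s : List Char) (stmts : List String),
    pvGoA s stmts [] false = stmts ++ pvSplitB s := by
  intro s
  induction hn : s.length using Nat.strong_induction_on generalizing s with
  | _ n ih =>
    intro stmts
    rw [pvGoA_findCut, pvSplitB]
    cases h : pvFindCut s false with
    | none => simp [pvCont, List.isEmpty_iff]; split <;> simp_all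
    | some i =>
      have hlt := pvFindCut_lt s false i h
      have hdec : (List.drop (i + 1) s).length < n := by
        subst hn; simp [List.length_drop]; omega
      simp only [pvCont]
      rw [ih _ hdec _ rfl]
      simp

-- ===== VERDICT (by name: the statement is the Claim_ definition above) =====
theorem split_awk_statements_py_spec : Claim_equal_split_awk_statements_py := by
  intro action _
  unfold Spec_split_awk_statements_py split_awk_statements_py split_awk_statements_py_alt
  simpa using pvGoA_eq_splitB action.toList []
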